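-- pv_equiv track=rewrite | github.com/ungit003/ungiTIL | aps12/240831/won's_string_game.py | find_same
-- ===== SOURCE A (Python) =====
-- def find_same(s, scr):
--     i = 0
--     # 문자열을 처음부터 끝까지 검사하기
--     while i < len(s) - 1:
--         if s[i] == s[i + 1]:
--             # 연속된 문자가 발견되면 erasing 함수 호출하여 제거하기
--             s, scr = erasing(s, scr, i)
--             # 문자열이 변경되었으므로 처음부터 다시 검사하기
--             i = 0
--         else:
--             i += 1
--     return s, scr
--
-- def erasing(s, scr, i):
--     cnt = 1
--     finding = i
--     # 연속된 문자의 길이를 계산하기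
--     while finding + 1 < len(s) and s[finding + 1] == s[finding]:
--         cnt += 1
--         finding += 1
--     s = s[:i] + s[i + cnt:]
--     scr += cnt
--     return s, scr
-- ===== SOURCE B (Python) =====
-- def find_same(s, scr):
--     # Single pass with a stack of (char, run_length); a maximal run of length >= 2
--     # is popped (its length added to scr) when a different char arrives or at the end.
--     stack = []  # list of [char, count]
--     for c in s:
--         while True:
--             if stack and stack[-1][0] == c:
--                 stack[-1][1] += 1
--                 break
--             if stack and stack[-1][1] >= 2:
--                 ch, cnt = stack.pop()
--                 scr += cnt
--                 continue
--             stack.append([c, 1])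
--             break
--     if stack and stack[-1][1] >= 2:
--         ch, cnt = stack.pop()
--         scr += cnt
--     return ''.join(ch * cnt for ch, cnt in stack), scr
-- ===== Notes on version B (the rewrite author's own statement) =====
-- stated objective: faster
-- what changed: A repeatedly rescans from position 0 after each run removal (quadratic); B makes a single left-to-right pass keeping a stack of (char, run-length) pairs, popping a maximal run of length >= 2 when a different character arrives (or at the end) and adding its length to the score.
import Mathlib
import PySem

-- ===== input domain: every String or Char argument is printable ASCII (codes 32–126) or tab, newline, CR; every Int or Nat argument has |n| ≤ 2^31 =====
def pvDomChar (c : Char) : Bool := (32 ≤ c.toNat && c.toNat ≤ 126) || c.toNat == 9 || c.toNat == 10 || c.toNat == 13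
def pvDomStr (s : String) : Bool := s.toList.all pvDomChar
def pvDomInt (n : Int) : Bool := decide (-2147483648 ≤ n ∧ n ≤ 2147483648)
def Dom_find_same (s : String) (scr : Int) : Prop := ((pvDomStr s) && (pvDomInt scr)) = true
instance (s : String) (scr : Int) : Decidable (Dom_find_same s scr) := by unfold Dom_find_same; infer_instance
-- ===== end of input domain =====

-- B replaces A's restart-from-0 rescans after each run removal by a single left-to-right pass
-- with a stack of (char, run-length) pairs (faster).

-- ===== PORT A =====
-- inner while of `erasing`: counts the length of the run of equal chars starting at `finding`
-- (all indices in A are nonnegative, so s[j] is cs[j]?; s[:i] + s[i+cnt:] is take i ++ drop (i+cnt),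
--  cf. PySem.List.slice_to_natCast / slice_from_natCast)
def eraseScan (cs : List Char) (finding : Nat) (cnt : Nat) : Nat :=
  if h : finding + 1 < cs.length ∧ cs[finding + 1]? = cs[finding]? then
    eraseScan cs (finding + 1) (cnt + 1)
  else cnt
termination_by cs.length - finding

lemma eraseScan_ge (cs : List Char) (finding cnt : Nat) : cnt ≤ eraseScan cs finding cnt := by
  fun_induction eraseScan with
  | case1 h ih => omega
  | case2 => omega

def erasing (cs : List Char) (scr : Int) (i : Nat) : List Char × Int :=
  let cnt := eraseScan cs i 1
  (cs.take i ++ cs.drop (i + cnt), scr + (cnt : Int))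

lemma erasing_length_lt (cs : List Char) (scr : Int) (i : Nat) (h : i + 1 < cs.length) :
    (erasing cs scr i).1.length < cs.length := by
  have h1 := eraseScan_ge cs i 1
  simp only [erasing]
  simp [List.length_append, List.length_take, List.length_drop]
  omega

-- outer while of find_same
def findLoop (cs : List Char) (scr : Int) (i : Nat) : List Char × Int :=
  if h : i + 1 < cs.length then
    if cs[i]? = cs[i + 1]? then
      findLoop (erasing cs scr i).1 (erasing cs scr i).2 0
    else
      findLoop cs scr (i + 1)
  else (cs, scr)
termination_by (cs.length, cs.length - i)
decreasing_by
  · exact Prod.Lex.left _ _ (erasing_length_lt cs scr i h)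
  · exact Prod.Lex.right _ (by omega)

def find_same (s : String) (scr : Int) : String × Int :=
  let r := findLoop s.toList scr 0
  (String.ofList r.1, r.2)

-- ===== PORT B =====
-- one step of the inner `while True` loop of Source B (stack top is the list head)
def pushChar (st : List (Char × Int)) (scr : Int) (c : Char) : List (Char × Int) × Int :=
  match st with
  | [] => ([(c, 1)], scr)
  | (ch, cnt) :: rest =>
    if ch = c then ((ch, cnt + 1) :: rest, scr)
    else if 2 ≤ cnt then pushChar rest (scr + cnt) c
    else ((c, 1) :: (ch, cnt) :: rest, scr)

-- the final `if stack and stack[-1][1] >= 2` pop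
def flushTop (st : List (Char × Int)) (scr : Int) : List (Char × Int) × Int :=
  match st with
  | (ch, cnt) :: rest => if 2 ≤ cnt then (rest, scr + cnt) else ((ch, cnt) :: rest, scr)
  | [] => ([], scr)

-- ''.join(ch * cnt for ch, cnt in stack)  (stack is top-first here, hence the reverse)
def renderStack (st : List (Char × Int)) : List Char :=
  st.reverse.flatMap fun p => List.replicate p.2.toNat p.1

def bCore (cs : List Char) (scr : Int) : List Char × Int :=
  let acc := cs.foldl (fun acc c => pushChar acc.1 acc.2 c) ([], scr)
  let fin := flushTop acc.1 acc.2
  (renderStack fin.1, fin.2)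

def find_same_alt (s : String) (scr : Int) : String × Int :=
  let r := bCore s.toList scr
  (String.ofList r.1, r.2)

-- ===== PRECONDITION & SPEC =====
def Spec_find_same (s : String) (scr : Int) (out : String × Int) : Prop := out = find_same_alt s scr
instance (s : String) (scr : Int) (out : String × Int) : Decidable (Spec_find_same s scr out) := by unfold Spec_find_same; infer_instance

-- ===== CLAIM (what is proved, stated in full; the proofs are below) =====
def Claim_equal_find_same : Prop := ∀ (s : String) (scr : Int), Dom_find_same s scr → Spec_find_same s scr (find_same s scr)

-- ===== LEMMAS AND PROOFS =====

-- the stack B builds after consuming a duplicate-free prefix p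
def stackOf (p : List Char) : List (Char × Int) := p.reverse.map (fun c => (c, 1))

lemma stackOf_nil : stackOf [] = [] := rfl

lemma stackOf_concat (p : List Char) (c : Char) : stackOf (p ++ [c]) = (c, 1) :: stackOf p := by
  simp [stackOf]

lemma push_new (p : List Char) (c : Char) (scr : Int) (h : ∀ x ∈ p.getLast?, x ≠ c) :
    pushChar (stackOf p) scr c = ((c, 1) :: stackOf p, scr) := by
  rcases List.eq_nil_or_concat p with rfl | ⟨q, x, rfl⟩
  · rfl
  · have hx : x ≠ c := h x (by simp)
    rw [List.concat_eq_append, stackOf_concat]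
    simp [pushChar, hx]

lemma fold_chain : ∀ (u p : List Char) (scr : Int), (p ++ u).IsChain (· ≠ ·) →
    u.foldl (fun acc c => pushChar acc.1 acc.2 c) (stackOf p, scr) = (stackOf (p ++ u), scr) := by
  intro u
  induction u with
  | nil => intro p scr _; simp
  | cons c u' ih =>
    intro p scr h
    have hlast : ∀ x ∈ p.getLast?, x ≠ c := by
      have h3 := (List.isChain_append.mp h).2.2
      intro x hx; exact h3 x hx c (by simp)
    have hx : (p ++ [c]) ++ u' = p ++ c :: u' := by simp
    simp only [List.foldl_cons]
    rw [push_new p c scr hlast, ← stackOf_concat, ← hx]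
    exact ih (p ++ [c]) scr (by rw [hx]; exact h)

lemma fold_chain0 (u : List Char) (scr : Int) (h : u.IsChain (· ≠ ·)) :
    u.foldl (fun acc c => pushChar acc.1 acc.2 c) ([], scr) = (stackOf u, scr) := by
  have h1 := fold_chain u [] scr (by simpa using h)
  rwa [stackOf_nil, List.nil_append] at h1

lemma push_run (c : Char) : ∀ (k : Nat) (n : Int) (st : List (Char × Int)) (scr : Int),
    (List.replicate k c).foldl (fun acc c => pushChar acc.1 acc.2 c) ((c, n) :: st, scr)
      = ((c, n + k) :: st, scr) := by
  intro k
  induction k with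
  | zero => intro n st scr; simp
  | succ k ih =>
    intro n st scr
    have h1 : pushChar ((c, n) :: st) scr c = ((c, n + 1) :: st, scr) := by simp [pushChar]
    rw [List.replicate_succ]
    simp only [List.foldl_cons]
    rw [h1, ih (n + 1) st scr]
    have hc : n + 1 + (k : Int) = n + ((k + 1 : Nat) : Int) := by push_cast; ring
    rw [hc]

lemma push_skip (c d : Char) (m : Nat) (st : List (Char × Int)) (scr : Int)
    (hm : 2 ≤ m) (hne : c ≠ d) :
    pushChar ((c, (m : Int)) :: st) scr d = pushChar st (scr + (m : Int)) d := by
  have h2 : (2 : Int) ≤ (m : Int) := by exact_mod_cast hm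
  simp [pushChar, hne, h2]

lemma flush_stackOf (p : List Char) (scr : Int) : flushTop (stackOf p) scr = (stackOf p, scr) := by
  rcases List.eq_nil_or_concat p with rfl | ⟨q, x, rfl⟩
  · rfl
  · rw [List.concat_eq_append, stackOf_concat]
    norm_num [flushTop]

lemma flush_run (c : Char) (m : Nat) (st : List (Char × Int)) (scr : Int) (hm : 2 ≤ m) :
    flushTop ((c, (m : Int)) :: st) scr = (st, scr + (m : Int)) := by
  have h2 : (2 : Int) ≤ (m : Int) := by exact_mod_cast hm
  simp [flushTop, h2]

lemma render_stackOf (p : List Char) : renderStack (stackOf p) = p := by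
  induction p with
  | nil => rfl
  | cons a p ih =>
    simp only [renderStack, stackOf, List.reverse_cons, List.map_append, List.reverse_append,
      List.map_cons, List.map_nil] at ih ⊢
    simp at ih ⊢
    exact ih

lemma findLoop_noDup (cs : List Char) (scr : Int) (h : cs.IsChain (· ≠ ·)) :
    ∀ (k j : Nat), cs.length ≤ j + k + 1 → findLoop cs scr j = (cs, scr) := by
  intro k
  induction k with
  | zero =>
    intro j hk
    rw [findLoop, dif_neg (by omega)]
  | succ k ih =>
    intro j hk
    by_cases hj : j + 1 < cs.length
    · have hne : cs[j]? ≠ cs[j + 1]? := by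
        rw [List.getElem?_eq_getElem (by omega : j < cs.length), List.getElem?_eq_getElem hj]
        intro hco
        exact (List.isChain_iff_getElem.mp h j hj) (Option.some.inj hco)
      rw [findLoop, dif_pos hj, if_neg hne]
      exact ih (j + 1) (by omega)
    · rw [findLoop, dif_neg hj]

lemma findLoop_scan (cs : List Char) (scr : Int) (i : Nat) (hlen : i + 1 < cs.length)
    (hne : ∀ j, j + 1 ≤ i → cs[j]? ≠ cs[j + 1]?) :
    ∀ (k j : Nat), j + k = i → findLoop cs scr j = findLoop cs scr i := by
  intro k
  induction k with
  | zero =>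
    intro j hj
    have : j = i := by omega
    rw [this]
  | succ k ih =>
    intro j hj
    have hj1 : j + 1 < cs.length := by omega
    rw [findLoop, dif_pos hj1, if_neg (hne j (by omega))]
    exact ih (j + 1) (by omega)

lemma getElem_run (p : List Char) (c : Char) (m : Nat) (r : List Char) (t : Nat) (ht : t < m) :
    (p ++ List.replicate m c ++ r)[p.length + t]? = some c := by
  rw [List.append_assoc, List.getElem?_append_right (by omega : p.length ≤ p.length + t)]
  have h1 : p.length + t - p.length = t := by omega
  rw [h1, List.getElem?_append_left (by simpa using ht)]
  simp [ht]

lemma eraseScan_run (p : List Char) (c : Char) (m : Nat) (r : List Char)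
    (hr : ∀ d ∈ r.head?, d ≠ c) :
    ∀ (k t : Nat), t + k + 1 = m →
      eraseScan (p ++ List.replicate m c ++ r) (p.length + t) (t + 1) = m := by
  intro k
  induction k with
  | zero =>
    intro t ht
    rw [eraseScan, dif_neg ?_]
    · omega
    rintro ⟨h1, h2⟩
    cases r with
    | nil =>
      simp [List.length_append, List.length_replicate] at h1
      omega
    | cons d r' =>
      have e1 : (p ++ List.replicate m c ++ r' |>.length) = 0 ∨ True := Or.inr trivial
      have e2 : (p ++ List.replicate m c ++ (d :: r'))[p.length + t]? = some c :=
        getElem_run p c m (d :: r') t (by omega)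
      have e3 : (p ++ List.replicate m c ++ (d :: r'))[p.length + t + 1]? = some d := by
        have hidx : p.length + t + 1 = (p ++ List.replicate m c).length + 0 := by
          simp [List.length_append, List.length_replicate]; omega
        rw [hidx, List.getElem?_append_right (by omega)]
        simp
      rw [e2, e3] at h2
      exact hr d (by simp) (Option.some.inj h2)
  | succ k ih =>
    intro t ht
    have hc1 : p.length + t + 1 < (p ++ List.replicate m c ++ r).length := by
      simp [List.length_append, List.length_replicate]
      omega
    have hc2 : (p ++ List.replicate m c ++ r)[p.length + t + 1]? =
        (p ++ List.replicate m c ++ r)[p.length + t]? := by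
      rw [getElem_run p c m r t (by omega)]
      have : p.length + t + 1 = p.length + (t + 1) := by omega
      rw [this, getElem_run p c m r (t + 1) (by omega)]
    rw [eraseScan, dif_pos ⟨hc1, hc2⟩]
    exact ih (t + 1) (by omega)

lemma decomp (cs : List Char) :
    cs.IsChain (· ≠ ·) ∨
    ∃ p c m r, cs = p ++ List.replicate m c ++ r ∧ (p ++ [c]).IsChain (· ≠ ·) ∧ 2 ≤ m ∧
      ∀ d ∈ r.head?, d ≠ c := by
  induction cs with
  | nil => left; exact List.isChain_nil
  | cons a t ih =>
    rcases ih with ht | ⟨p, c, m, r, rfl, hpc, hm, hr⟩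
    · by_cases ha : t.head? = some a
      · right
        obtain ⟨t', rfl⟩ : ∃ t', t = a :: t' := by
          cases t with
          | nil => simp at ha
          | cons x t' =>
            simp at ha
            exact ⟨t', by rw [ha]⟩
        refine ⟨[], a, 2, t', by simp [show List.replicate 2 a = [a, a] from rfl], ?_, le_refl 2, ?_⟩
        · simp
        · intro d hd h
          exact ((List.isChain_cons.mp ht).1 d hd) h.symm
      · left
        refine List.isChain_cons.mpr ⟨?_, ht⟩
        intro y hy h
        exact ha (by rw [h]; exact hy)
    · right
      cases p with
      | nil =>
        by_cases hac : a = c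
        · subst hac
          exact ⟨[], a, m + 1, r, by simp [List.replicate_succ], by simp,
            by omega, hr⟩
        · have hch : List.IsChain (· ≠ ·) ([a] ++ [c]) := by
            rw [List.singleton_append]
            exact List.isChain_pair.mpr hac
          exact ⟨[a], c, m, r, by simp, hch, hm, hr⟩
      | cons b p' =>
        by_cases hab : a = b
        · subst hab
          refine ⟨[], a, 2, p' ++ (List.replicate m c ++ r),
            by simp [show List.replicate 2 a = [a, a] from rfl], by simp,
            le_refl 2, ?_⟩
          intro d hd h
          cases p' with
          | nil =>
            have hdc : d = c := by
              obtain ⟨m'', rfl⟩ : ∃ m'', m = m'' + 1 := ⟨m - 1, by omega⟩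
              simp [List.replicate_succ] at hd
              exact hd.symm
            have hac : a ≠ c := by simpa using hpc
            exact hac (by rw [← h]; exact hdc)
          | cons e p'' =>
            simp at hd
            have hae : a ≠ e := by
              have h5 := hpc
              rw [List.cons_append, List.cons_append] at h5
              exact (List.isChain_cons_cons.mp h5).1
            exact hae (by rw [← h]; exact hd.symm)
        · refine ⟨a :: b :: p', c, m, r, by simp, ?_, hm, hr⟩
          rw [List.cons_append]
          refine List.isChain_cons.mpr ⟨?_, hpc⟩
          intro y hy
          simp only [List.cons_append, List.head?_cons, Option.mem_def, Option.some.injEq] at hy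
          subst hy
          exact hab

lemma core_eq_aux : ∀ (n : Nat) (cs : List Char) (scr : Int), cs.length ≤ n →
    findLoop cs scr 0 = bCore cs scr := by
  intro n
  induction n with
  | zero =>
    intro cs scr h
    have hnil : cs = [] := List.eq_nil_of_length_eq_zero (by omega)
    subst hnil
    rw [findLoop, dif_neg (by simp)]
    rfl
  | succ n ih =>
    intro cs scr hlen
    rcases decomp cs with hch | ⟨p, c, m, r, rfl, hpc, hm, hr⟩
    · rw [findLoop_noDup cs scr hch cs.length 0 (by omega)]
      have hf := fold_chain0 cs scr hch
      simp [bCore, hf, flush_stackOf, render_stackOf]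
    · have hp : p.IsChain (· ≠ ·) := hpc.left_of_append
      have hlast : ∀ x ∈ p.getLast?, x ≠ c := by
        have h3 := (List.isChain_append.mp hpc).2.2
        intro x hx; exact h3 x hx c (by simp)
      -- length facts
      have hlen2 : (p ++ List.replicate m c ++ r).length = p.length + m + r.length := by
        simp only [List.length_append, List.length_replicate]
      -- A side: scan to p.length without change
      have hne : ∀ j, j + 1 ≤ p.length →
          (p ++ List.replicate m c ++ r)[j]? ≠ (p ++ List.replicate m c ++ r)[j + 1]? := by
        have key : ∀ u, u ≤ p.length →
            (p ++ List.replicate m c ++ r)[u]? = (p ++ [c])[u]? := by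
          intro u hu
          rcases Nat.lt_or_ge u p.length with hu' | hu'
          · rw [List.append_assoc, List.getElem?_append_left hu', List.getElem?_append_left hu']
          · have hu2 : u = p.length := by omega
            subst hu2
            rw [show (p ++ List.replicate m c ++ r)[p.length]? = some c by
              simpa using getElem_run p c m r 0 (by omega)]
            rw [List.getElem?_append_right (le_refl _)]
            simp
        intro j hj
        rw [key j (by omega), key (j + 1) hj]
        have hjlt : j + 1 < (p ++ [c]).length := by simp; omega
        rw [List.getElem?_eq_getElem (by simp; omega : j < (p ++ [c]).length),
          List.getElem?_eq_getElem hjlt]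
        intro hco
        exact (List.isChain_iff_getElem.mp hpc j hjlt) (Option.some.inj hco)
      have hAscan : findLoop (p ++ List.replicate m c ++ r) scr 0 =
          findLoop (p ++ List.replicate m c ++ r) scr p.length :=
        findLoop_scan _ scr p.length (by rw [hlen2]; omega) hne p.length 0 (by omega)
      -- A side: the erase step
      have hcount : eraseScan (p ++ List.replicate m c ++ r) p.length 1 = m := by
        have h6 := eraseScan_run p c m r hr (m - 1) 0 (by omega)
        simpa using h6
      have hAstep : findLoop (p ++ List.replicate m c ++ r) scr p.length =
          findLoop (p ++ r) (scr + (m : Int)) 0 := by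
        have hq1 : p.length + 1 < (p ++ List.replicate m c ++ r).length := by rw [hlen2]; omega
        have hq2 : (p ++ List.replicate m c ++ r)[p.length]? =
            (p ++ List.replicate m c ++ r)[p.length + 1]? := by
          rw [show (p ++ List.replicate m c ++ r)[p.length]? = some c by
            simpa using getElem_run p c m r 0 (by omega)]
          rw [getElem_run p c m r 1 (by omega)]
        have t1 : (p ++ List.replicate m c ++ r).take p.length = p := by
          rw [List.append_assoc]
          exact List.take_left ..
        have t2 : (p ++ List.replicate m c ++ r).drop (p.length + m) = r := by
          rw [show p.length + m = (p ++ List.replicate m c).length by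
            simp [List.length_append, List.length_replicate]]
          exact List.drop_left ..
        have e1 : erasing (p ++ List.replicate m c ++ r) scr p.length = (p ++ r, scr + (m : Int)) := by
          simp only [erasing]
          rw [hcount, t1, t2]
        rw [findLoop, dif_pos hq1, if_pos hq2, e1]
      -- B side
      have hB : bCore (p ++ List.replicate m c ++ r) scr = bCore (p ++ r) (scr + (m : Int)) := by
        obtain ⟨m'', hm''⟩ : ∃ m'', m = m'' + 1 := ⟨m - 1, by omega⟩
        have hfold1 : (p ++ List.replicate m c ++ r).foldl
            (fun acc c => pushChar acc.1 acc.2 c) ([], scr)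
            = r.foldl (fun acc c => pushChar acc.1 acc.2 c) ((c, (m : Int)) :: stackOf p, scr) := by
          rw [List.foldl_append, List.foldl_append, fold_chain0 p scr hp]
          congr 1
          rw [hm'', List.replicate_succ]
          simp only [List.foldl_cons]
          rw [push_new p c scr hlast, push_run c m'' 1 (stackOf p) scr]
          congr 3
          push_cast
          ring
        have hfold2 : (p ++ r).foldl (fun acc c => pushChar acc.1 acc.2 c) ([], scr + (m : Int))
            = r.foldl (fun acc c => pushChar acc.1 acc.2 c) (stackOf p, scr + (m : Int)) := by
          rw [List.foldl_append, fold_chain0 p (scr + (m : Int)) hp]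
        cases r with
        | nil =>
          simp only [bCore, hfold1, hfold2, List.foldl_nil]
          rw [flush_run c m (stackOf p) scr hm, flush_stackOf]
        | cons d r' =>
          have hd : c ≠ d := fun h => (hr d (by simp)) h.symm
          simp only [bCore, hfold1, hfold2, List.foldl_cons]
          rw [push_skip c d m (stackOf p) scr hm hd]
      rw [hAscan, hAstep, ih (p ++ r) (scr + (m : Int)) (by
        rw [hlen2] at hlen
        simp [List.length_append]
        omega), hB]

theorem core_eq (cs : List Char) (scr : Int) : findLoop cs scr 0 = bCore cs scr :=
  core_eq_aux cs.length cs scr (le_refl _)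

-- ===== VERDICT (by name: the statement is the Claim_ definition above) =====
theorem find_same_spec : Claim_equal_find_same := by
  intro s scr _
  unfold Spec_find_same find_same find_same_alt
  rw [core_eq]
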